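-- pv_equiv track=rewrite | github.com/CSStudySession/AlgoInPython | Pins/Pins construct target string from substrings of source string.py | count_copies_bs
-- ===== SOURCE A (Python) =====
-- from collections import defaultdict
--
-- def can_create(source: str, target: str) -> bool:
--     source = source.lower()
--     target = target.lower()
--     # 把 source 中所有字符放入一个 set 里（去重 + 快速查找）
--     source_set = set()
--     for c in source:
--         source_set.add(c)
--     # 遍历 target 的每个字符，看是否都在 source_set 中
--     for c in target:
--         if c not in source_set:
--             return False  # 有一个找不到就直接返回 False
--     return True  # 所有字符都找到了
--
-- def count_copies_bs(source: str, target: str) -> int: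
--     if not can_create(source, target):
--         return 0
--     source = source.lower()
--     target = target.lower()
--     # Step 1: 构建 source 中每个字符出现的所有位置（升序列表）
--     char_index = defaultdict(list)
--     for idx, char in enumerate(source):
--         char_index[char].append(idx)
--     cnt = 1  # 至少要用一次 source 副本
--     pos_in_src = -1  # 当前正在匹配的 source 索引位置
--     for char in target:
--         indices = char_index[char]
--         # 用 bisect 在 indices 中查找第一个 > pos_in_source 的索引
--         i = binary_search(indices, pos_in_src)
--         if i == -1:
--             # 没找到 说明要用一个新的source副本
--             cnt += 1
--             pos_in_src = indices[0]
--         else: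
--             # 找到了 更新当前位置
--             pos_in_src = indices[i]
--     return cnt
--
-- def binary_search(indices, pos_in_src): # 在indices中找第一个大于pos_in_src的元素 返回其下标
--     if not indices:
--         return -1
--     left, right = 0, len(indices) - 1
--     while left < right:
--         mid = (left + right) // 2
--         if indices[mid] > pos_in_src:
--             right = mid
--         else:
--             left = mid + 1
--     return right if indices[right] > pos_in_src else -1
-- ===== SOURCE B (Python) =====
-- def find_from(src, c, pos):
--     # first index i >= pos with src[i] == c, or -1
--     i = pos
--     while i < len(src):
--         if src[i] == c:
--             return i
--         i += 1
--     return -1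
--
-- def count_copies_bs(source: str, target: str) -> int:
--     src = source.lower()
--     tgt = target.lower()
--     cnt, pos = 1, 0
--     for c in tgt:
--         j = find_from(src, c, pos)
--         if j == -1:
--             j = find_from(src, c, 0)
--             if j == -1:
--                 return 0
--             cnt += 1
--         pos = j + 1
--     return cnt
-- ===== Notes on version B (the rewrite author's own statement) =====
-- stated objective: simpler
-- what changed: B replaces A's set prepass, per-character index dictionary and hand-rolled binary search with a single greedy pass that linearly probes the source for the next occurrence of each target character (restarting from 0 with a new copy, returning 0 when the character is absent).
import Mathlib
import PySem

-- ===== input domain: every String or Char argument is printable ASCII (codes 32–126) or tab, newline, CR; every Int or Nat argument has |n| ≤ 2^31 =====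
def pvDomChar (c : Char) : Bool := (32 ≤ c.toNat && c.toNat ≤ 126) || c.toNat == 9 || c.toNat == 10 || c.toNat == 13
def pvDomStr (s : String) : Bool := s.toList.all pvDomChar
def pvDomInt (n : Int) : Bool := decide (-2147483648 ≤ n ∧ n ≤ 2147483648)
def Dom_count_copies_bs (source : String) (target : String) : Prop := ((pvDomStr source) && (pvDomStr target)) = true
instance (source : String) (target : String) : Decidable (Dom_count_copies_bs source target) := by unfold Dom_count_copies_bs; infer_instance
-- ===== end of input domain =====

-- B replaces A's set prepass, per-character index dictionary and hand-rolled binary search with a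
-- single greedy pass that linearly probes the source for the next occurrence of each target
-- character; objective: simpler (not faster).

-- ===== PORT A =====

def can_create (source : String) (target : String) : Bool :=
  let src := (PySem.Str.lower source).toList
  let tgt := (PySem.Str.lower target).toList
  -- source_set built by the for-loop 'for c in source: source_set.add(c)'
  let sourceSet := src.foldl PySem.Set.add PySem.Set.empty
  -- 'for c in target: if c not in source_set: return False' / 'return True'
  tgt.all fun c => PySem.Set.contains sourceSet c

-- 'for idx, char in enumerate(source): char_index[char].append(idx)'  (defaultdict(list))
def buildIdx : List Char → Int → PySem.Dict Char (List Int) → PySem.Dict Char (List Int)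
  | [], _, d => d
  | ch :: rest, idx, d => buildIdx rest (idx + 1) (d.modify ch [] (fun l => l ++ [idx]))

-- the 'while left < right' loop of binary_search (plus the final check / return)
def bsLoop (l : List Int) (q : Int) (left right : Int) : Int :=
  if h : left < right then
    let mid := PySem.Int.floordiv (left + right) 2
    if q < PySem.List.pyGetD l mid 0 then bsLoop l q left mid
    else bsLoop l q (mid + 1) right
  else if q < PySem.List.pyGetD l right 0 then right else -1
termination_by (right - left).toNat
decreasing_by
  all_goals
    simp only [PySem.Int.floordiv_eq_ediv_of_pos (by norm_num : (0:Int) < 2)]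
    omega

def binSearch (indices : List Int) (posInSrc : Int) : Int :=
  if indices = [] then -1
  else bsLoop indices posInSrc 0 ((indices.length : Int) - 1)

-- the 'for char in target' loop of count_copies_bs; list indexing indices[0] / indices[i] is ported
-- with pyGetD (in range: under the can_create guard indices is nonempty and i a valid index)
def aLoop (d : PySem.Dict Char (List Int)) : List Char → Int → Int → Int
  | [], cnt, _ => cnt
  | ch :: rest, cnt, posInSrc =>
    let indices := d.getD ch []
    let i := binSearch indices posInSrc
    if i = -1 then aLoop d rest (cnt + 1) (PySem.List.pyGetD indices 0 0)
    else aLoop d rest cnt (PySem.List.pyGetD indices i 0)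

def count_copies_bs (source : String) (target : String) : Int :=
  if can_create source target = false then 0
  else
    let src := (PySem.Str.lower source).toList
    let tgt := (PySem.Str.lower target).toList
    let charIndex := buildIdx src 0 PySem.Dict.empty
    aLoop charIndex tgt 1 (-1)

-- ===== PORT B =====

-- find_from(src, c, pos): linear probe 'while i < len(src): if src[i] == c: return i; i += 1'
-- (Python's -1 = "not found" is modelled as none)
def findFromC (src : List Char) (c : Char) (i : Nat) : Option Nat :=
  if h : i < src.length then
    if src[i] = c then some i else findFromC src c (i + 1)
  else none
termination_by src.length - i

-- the 'for c in tgt' loop of B (early 'return 0' when the character is absent)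
def bLoop (src : List Char) : List Char → Int → Nat → Int
  | [], cnt, _ => cnt
  | c :: rest, cnt, pos =>
    match findFromC src c pos with
    | some j => bLoop src rest cnt (j + 1)
    | none =>
      match findFromC src c 0 with
      | some j => bLoop src rest (cnt + 1) (j + 1)
      | none => 0

def count_copies_bs_alt (source : String) (target : String) : Int :=
  let src := (PySem.Str.lower source).toList
  let tgt := (PySem.Str.lower target).toList
  bLoop src tgt 1 0

-- ===== PRECONDITION & SPEC =====
def Spec_count_copies_bs (source : String) (target : String) (out : Int) : Prop := out = count_copies_bs_alt source target
instance (source : String) (target : String) (out : Int) : Decidable (Spec_count_copies_bs source target out) := by unfold Spec_count_copies_bs; infer_instance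

-- ===== CLAIM (what is proved, stated in full; the proofs are below) =====
def Claim_equal_count_copies_bs : Prop := ∀ (source : String) (target : String), Dom_count_copies_bs source target → Spec_count_copies_bs source target (count_copies_bs source target)

-- ===== LEMMAS AND PROOFS =====

-- occFrom l c k = the indices (offset by k) at which c occurs in l, in increasing order;
-- this is what A's char_index dictionary stores per character.
def occFrom : List Char → Char → Nat → List Int
  | [], _, _ => []
  | x :: xs, c, k => (if x = c then [(k : Int)] else []) ++ occFrom xs c (k + 1)

-- firstGT l q = the first element of l that is > q (for sorted l: the least such element);
-- this is what A's binary search computes.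
def firstGT : List Int → Int → Option Int
  | [], _ => none
  | x :: xs, q => if q < x then some x else firstGT xs q

lemma occFrom_lb (c : Char) : ∀ (l : List Char) (k : Nat) (x : Int),
    x ∈ occFrom l c k → (k : Int) ≤ x := by
  intro l
  induction l with
  | nil => intro k x hx; simp [occFrom] at hx
  | cons a t ih =>
    intro k x hx
    rcases List.mem_append.1 hx with h | h
    · by_cases hac : a = c <;> simp [hac] at h; omega
    · have := ih (k + 1) x h
      push_cast at this ⊢
      omega

lemma occFrom_sorted (c : Char) : ∀ (l : List Char) (k : Nat),
    (occFrom l c k).Pairwise (· ≤ ·) := by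
  intro l
  induction l with
  | nil => intro k; simp [occFrom]
  | cons a t ih =>
    intro k
    by_cases hac : a = c
    · simp only [occFrom, hac]
      refine List.pairwise_cons.2 ⟨fun x hx => ?_, ih (k + 1)⟩
      have := occFrom_lb c t (k + 1) x hx
      push_cast at this ⊢
      omega
    · simpa [occFrom, hac] using ih (k + 1)

lemma occFrom_mem (c : Char) : ∀ (l : List Char) (k : Nat) (x : Int),
    x ∈ occFrom l c k ↔ ∃ (i : Nat) (h : i < l.length), l[i] = c ∧ x = (k : Int) + i := by
  intro l
  induction l with
  | nil => intro k x; simp [occFrom]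
  | cons a t ih =>
    intro k x
    constructor
    · intro hx
      rcases List.mem_append.1 hx with h | h
      · by_cases hac : a = c <;> simp [hac] at h
        exact ⟨0, by simp, by simpa using hac, by simpa using h⟩
      · rcases (ih (k + 1) x).1 h with ⟨i, hi, hc, hx'⟩
        refine ⟨i + 1, by simpa using Nat.succ_lt_succ hi, by simpa using hc, ?_⟩
        push_cast at hx' ⊢
        omega
    · rintro ⟨i, hi, hc, rfl⟩
      cases i with
      | zero =>
        simp only [List.getElem_cons_zero] at hc
        apply List.mem_append.2
        left
        simp [hc]
      | succ n =>
        apply List.mem_append.2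
        right
        refine (ih (k + 1) _).2 ⟨n, by simpa using Nat.lt_of_succ_lt_succ hi, by simpa using hc, ?_⟩
        push_cast
        ring

lemma firstGT_none_iff (l : List Int) (q : Int) :
    firstGT l q = none ↔ ∀ x ∈ l, x ≤ q := by
  induction l with
  | nil => simp [firstGT]
  | cons a t ih =>
    by_cases h : q < a
    · simp only [firstGT, if_pos h]
      constructor
      · intro h0; cases h0
      · intro hall; exact absurd (hall a (List.mem_cons_self)) (by omega)
    · simp only [firstGT, if_neg h]
      rw [ih]
      constructor
      · intro h1 x hx
        rcases List.mem_cons.1 hx with rfl | hx'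
        · omega
        · exact h1 x hx'
      · intro h1 x hx
        exact h1 x (List.mem_cons_of_mem _ hx)

lemma firstGT_some_spec (q x : Int) : ∀ (l : List Int), l.Pairwise (· ≤ ·) →
    firstGT l q = some x → x ∈ l ∧ q < x ∧ ∀ y ∈ l, q < y → x ≤ y := by
  intro l
  induction l with
  | nil => intro _ h; simp [firstGT] at h
  | cons a t ih =>
    intro hs h
    have hs' := List.pairwise_cons.1 hs
    by_cases hqa : q < a
    · simp only [firstGT, if_pos hqa, Option.some_inj] at h
      subst h
      refine ⟨List.mem_cons_self, hqa, ?_⟩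
      intro y hy hqy
      rcases List.mem_cons.1 hy with rfl | hy'
      · omega
      · exact hs'.1 y hy'
    · simp only [firstGT, if_neg hqa] at h
      obtain ⟨hmem, hqx, hmin⟩ := ih hs'.2 h
      refine ⟨List.mem_cons_of_mem _ hmem, hqx, ?_⟩
      intro y hy hqy
      rcases List.mem_cons.1 hy with rfl | hy'
      · omega
      · exact hmin y hy' hqy

lemma firstGT_eq_idx (q : Int) : ∀ (l : List Int) (j : Nat) (hj : j < l.length),
    q < l[j] → (∀ (k : Nat) (hk : k < l.length), k < j → l[k] ≤ q) →
    firstGT l q = some l[j] := by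
  intro l
  induction l with
  | nil => intro j hj; simp at hj
  | cons a t ih =>
    intro j hj hqj hall
    cases j with
    | zero =>
      simp only [List.getElem_cons_zero] at hqj ⊢
      simp [firstGT, hqj]
    | succ n =>
      have ha : a ≤ q := by simpa using hall 0 (by simp) (Nat.succ_pos n)
      simp only [List.getElem_cons_succ] at hqj ⊢
      rw [firstGT, if_neg (by omega)]
      exact ih n (by simpa using Nat.lt_of_succ_lt_succ hj) hqj
        (fun k hk hkn => by simpa using hall (k + 1) (by simpa using Nat.succ_lt_succ hk) (Nat.succ_lt_succ hkn))

-- findFromC finds nothing iff c does not occur at an index ≥ i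
lemma findFromC_none_iff (src : List Char) (c : Char) : ∀ (i : Nat),
    findFromC src c i = none ↔ ∀ (m : Nat) (hm : m < src.length), i ≤ m → src[m] ≠ c := by
  have H : ∀ (fuel i : Nat), src.length - i ≤ fuel →
      (findFromC src c i = none ↔ ∀ (m : Nat) (hm : m < src.length), i ≤ m → src[m] ≠ c) := by
    intro fuel
    induction fuel with
    | zero =>
      intro i hle
      rw [findFromC, dif_neg (by omega)]
      constructor
      · intro _ m hm him; omega
      · intro _; rfl
    | succ f ihf =>
      intro i hle
      rw [findFromC]
      by_cases h : i < src.length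
      · rw [dif_pos h]
        by_cases hc2 : src[i] = c
        · rw [if_pos hc2]
          constructor
          · intro h0; cases h0
          · intro hall; exact absurd hc2 (hall i h le_rfl)
        · rw [if_neg hc2, ihf (i + 1) (by omega)]
          constructor
          · intro h1 m hm him
            rcases Nat.eq_or_lt_of_le him with rfl | hlt
            · exact hc2
            · exact h1 m hm hlt
          · intro h1 m hm him
            exact h1 m hm (by omega)
      · rw [dif_neg h]
        constructor
        · intro _ m hm him; omega
        · intro _; rfl
  intro i
  exact H (src.length - i) i le_rfl

-- findFromC finds the least occurrence index ≥ i
lemma findFromC_some_spec (src : List Char) (c : Char) : ∀ (i j : Nat),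
    findFromC src c i = some j →
    i ≤ j ∧ ∃ hj : j < src.length, src[j] = c ∧
      ∀ (m : Nat) (hm : m < src.length), i ≤ m → m < j → src[m] ≠ c := by
  have H : ∀ (fuel i j : Nat), src.length - i ≤ fuel → findFromC src c i = some j →
      i ≤ j ∧ ∃ hj : j < src.length, src[j] = c ∧
        ∀ (m : Nat) (hm : m < src.length), i ≤ m → m < j → src[m] ≠ c := by
    intro fuel
    induction fuel with
    | zero =>
      intro i j hle h
      rw [findFromC, dif_neg (by omega)] at h
      cases h
    | succ f ihf =>
      intro i j hle h
      rw [findFromC] at h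
      by_cases hi : i < src.length
      · rw [dif_pos hi] at h
        by_cases hc2 : src[i] = c
        · rw [if_pos hc2] at h
          obtain rfl : i = j := by simpa using h
          exact ⟨le_rfl, hi, hc2, fun m hm him hmj => by omega⟩
        · rw [if_neg hc2] at h
          obtain ⟨hij, hj, hcj, hmin⟩ := ihf (i + 1) j (by omega) h
          refine ⟨by omega, hj, hcj, ?_⟩
          intro m hm him hmj
          rcases Nat.eq_or_lt_of_le him with rfl | hlt
          · exact hc2
          · exact hmin m hm hlt hmj
      · rw [dif_neg hi] at h
        cases h
  intro i j h
  exact H (src.length - i) i j le_rfl h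

-- the bridge between A's structure and B's: A's "first stored index > p-1" is
-- B's "linear probe from p"
lemma firstGT_occ_eq (src : List Char) (c : Char) (p : Nat) :
    firstGT (occFrom src c 0) ((p : Int) - 1) = (findFromC src c p).map (fun j => (j : Int)) := by
  cases h : findFromC src c p with
  | none =>
    rw [(findFromC_none_iff src c p)] at h
    show firstGT (occFrom src c 0) ((p : Int) - 1) = none
    rw [firstGT_none_iff]
    intro x hx
    rcases (occFrom_mem c src 0 x).1 hx with ⟨i, hi, hci, rfl⟩
    by_contra hgt
    have hip : p ≤ i := by omega
    exact h i hi hip hci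
  | some j =>
    obtain ⟨hpj, hj, hcj, hmin⟩ := findFromC_some_spec src c p j h
    have hjmem : ((j : Int)) ∈ occFrom src c 0 :=
      (occFrom_mem c src 0 _).2 ⟨j, hj, hcj, by simp⟩
    have hne : firstGT (occFrom src c 0) ((p : Int) - 1) ≠ none := by
      intro hnone
      rw [firstGT_none_iff] at hnone
      have := hnone _ hjmem
      push_cast at this
      omega
    obtain ⟨x, hx⟩ := Option.ne_none_iff_exists'.1 hne
    obtain ⟨hxmem, hqx, hxmin⟩ := firstGT_some_spec _ x _ (occFrom_sorted c src 0) hx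
    rcases (occFrom_mem c src 0 x).1 hxmem with ⟨i, hi, hci, rfl⟩
    have hip : p ≤ i := by push_cast at hqx; omega
    have hji : j ≤ i := by
      by_contra hij
      exact hmin i hi hip (by omega) hci
    have hxj : ((0 : Int) + i) ≤ (j : Int) := hxmin _ hjmem (by omega)
    have : i = j := by push_cast at hxj; omega
    subst this
    rw [hx]
    simp

-- A's binary-search loop computes firstGT (on a sorted list, under the loop invariant)
lemma bsLoop_eq (l : List Int) (q : Int) (hs : l.Pairwise (· ≤ ·)) :
    ∀ (fuel : Nat) (left right : Int), (right - left).toNat ≤ fuel →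
    0 ≤ left → left ≤ right → right < (l.length : Int) →
    (∀ (k : Nat) (hk : k < l.length), (k : Int) < left → l[k] ≤ q) →
    (PySem.List.pyGetD l right 0 ≤ q → right = (l.length : Int) - 1) →
    (if bsLoop l q left right = -1 then (none : Option Int)
     else some (PySem.List.pyGetD l (bsLoop l q left right) 0)) = firstGT l q := by
  intro fuel
  induction fuel with
  | zero =>
    intro left right hfuel h0 hlr hrlen hinv1 hinv2
    have heq : left = right := by omega
    subst heq
    rw [bsLoop, dif_neg (by omega)]
    have hl0 : 0 ≤ left := h0
    have hlt : left.toNat < l.length := by omega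
    have hget : PySem.List.pyGetD l left 0 = l[left.toNat] :=
      PySem.List.pyGetD_eq_getElem l 0 h0 (by omega)
    by_cases hq : q < PySem.List.pyGetD l left 0
    · rw [if_pos hq, if_neg (by omega), hget]
      exact (firstGT_eq_idx q l left.toNat hlt (hget ▸ hq)
        (fun k hk hkl => hinv1 k hk (by omega))).symm
    · rw [if_neg hq, if_pos rfl]
      have hlast : left = (l.length : Int) - 1 := hinv2 (by omega)
      symm
      rw [firstGT_none_iff]
      intro x hx
      rcases List.mem_iff_getElem.1 hx with ⟨k, hk, rfl⟩
      by_cases hkl : k = left.toNat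
      · subst hkl
        rw [← hget]
        omega
      · exact hinv1 k hk (by omega)
  | succ f ihf =>
    intro left right hfuel h0 hlr hrlen hinv1 hinv2
    by_cases hlt : left < right
    · rw [bsLoop, dif_pos hlt,
          PySem.Int.floordiv_eq_ediv_of_pos (by norm_num : (0 : Int) < 2)]
      have hmb : left ≤ (left + right) / 2 ∧ (left + right) / 2 < right := by omega
      by_cases hq : q < PySem.List.pyGetD l ((left + right) / 2) 0
      · rw [if_pos hq]
        exact ihf left ((left + right) / 2) (by omega) h0 (by omega) (by omega) hinv1
          (fun hle => by omega)
      · rw [if_neg hq]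
        have hmid0 : 0 ≤ (left + right) / 2 := by omega
        have hmidlen : (left + right) / 2 < (l.length : Int) := by omega
        have hgetmid : PySem.List.pyGetD l ((left + right) / 2) 0 = l[((left + right) / 2).toNat] :=
          PySem.List.pyGetD_eq_getElem l 0 hmid0 hmidlen
        refine ihf ((left + right) / 2 + 1) right (by omega) (by omega) (by omega) hrlen ?_ hinv2
        intro k hk hkmid
        by_cases hkl : (k : Int) < left
        · exact hinv1 k hk hkl
        · have hkle : k ≤ ((left + right) / 2).toNat := by omega
          rcases Nat.eq_or_lt_of_le hkle with rfl | hklt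
          · rw [← hgetmid]; omega
          · have hle : l[k] ≤ l[((left + right) / 2).toNat] :=
              List.pairwise_iff_getElem.1 hs k ((left + right) / 2).toNat hk (by omega) hklt
            rw [← hgetmid] at hle
            omega
    · rw [bsLoop, dif_neg hlt]
      -- same as the base case: left = right
      have heq : left = right := by omega
      subst heq
      have hget : PySem.List.pyGetD l left 0 = l[left.toNat] :=
        PySem.List.pyGetD_eq_getElem l 0 h0 (by omega)
      by_cases hq : q < PySem.List.pyGetD l left 0
      · rw [if_pos hq, if_neg (by omega), hget]
        exact (firstGT_eq_idx q l left.toNat (by omega) (hget ▸ hq)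
          (fun k hk hkl => hinv1 k hk (by omega))).symm
      · rw [if_neg hq, if_pos rfl]
        have hlast : left = (l.length : Int) - 1 := hinv2 (by omega)
        symm
        rw [firstGT_none_iff]
        intro x hx
        rcases List.mem_iff_getElem.1 hx with ⟨k, hk, rfl⟩
        by_cases hkl : k = left.toNat
        · subst hkl
          rw [← hget]
          omega
        · exact hinv1 k hk (by omega)

-- binSearch, resolved through the list, is firstGT
lemma binSearch_resolve (l : List Int) (q : Int) (hs : l.Pairwise (· ≤ ·)) (hne : l ≠ []) :
    (if binSearch l q = -1 then (none : Option Int)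
     else some (PySem.List.pyGetD l (binSearch l q) 0)) = firstGT l q := by
  have hlen : 0 < l.length := List.length_pos_iff.2 hne
  rw [binSearch, if_neg hne]
  exact bsLoop_eq l q hs (((l.length : Int) - 1 - 0).toNat) 0 ((l.length : Int) - 1)
    le_rfl le_rfl (by omega) (by omega)
    (fun k hk hkl => by omega)
    (fun _ => rfl)

-- A's dictionary stores occFrom: the fold over the source builds exactly the occurrence lists
lemma buildIdx_getD : ∀ (l : List Char) (k : Nat) (d : PySem.Dict Char (List Int)) (c : Char),
    (buildIdx l (k : Int) d).getD c [] = d.getD c [] ++ occFrom l c k := by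
  intro l
  induction l with
  | nil => intro k d c; simp [buildIdx, occFrom]
  | cons a t ih =>
    intro k d c
    have hcast : ((k : Int) + 1) = ((k + 1 : Nat) : Int) := by push_cast; ring
    show (buildIdx t ((k : Int) + 1) (d.modify a [] (fun l => l ++ [(k : Int)]))).getD c [] = _
    rw [hcast, ih (k + 1), PySem.Dict.getD_modify]
    by_cases hac : c = a
    · subst hac
      simp [occFrom]
    · rw [if_neg hac]
      have hac' : ¬a = c := fun h => hac h.symm
      simp [occFrom, hac']

-- if some target character is absent from the source, B returns 0
lemma bLoop_zero (src : List Char) : ∀ (tgt : List Char) (cnt : Int) (pos : Nat),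
    (∃ c ∈ tgt, c ∉ src) → bLoop src tgt cnt pos = 0 := by
  intro tgt
  induction tgt with
  | nil => rintro cnt pos ⟨c, hc, _⟩; cases hc
  | cons c rest ih =>
    intro cnt pos hex
    by_cases hcs : c ∈ src
    · have hex' : ∃ x ∈ rest, x ∉ src := by
        rcases hex with ⟨x, hx, hxs⟩
        rcases List.mem_cons.1 hx with rfl | hx'
        · exact absurd hcs hxs
        · exact ⟨x, hx', hxs⟩
      have h0ne : findFromC src c 0 ≠ none := by
        intro h0
        rcases List.mem_iff_getElem.1 hcs with ⟨i, hi, rfl⟩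
        exact (findFromC_none_iff src _ 0).1 h0 i hi (Nat.zero_le i) rfl
      rw [bLoop]
      cases hfp : findFromC src c pos with
      | some j => exact ih cnt (j + 1) hex'
      | none =>
        cases h0 : findFromC src c 0 with
        | none => exact absurd h0 h0ne
        | some j => exact ih (cnt + 1) (j + 1) hex'
    · have hnone : ∀ (i : Nat), findFromC src c i = none := by
        intro i
        rw [findFromC_none_iff]
        intro m hm _ hceq
        exact hcs (hceq ▸ List.getElem_mem hm)
      rw [bLoop, hnone pos, hnone 0]
  -- (when c itself is absent both probes fail and B returns 0 immediately)

-- the main loop correspondence: A's position pos_in_src relates to B's position p by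
-- pos_in_src = p - 1
lemma loop_eq (src : List Char) (d : PySem.Dict Char (List Int))
    (hd : ∀ c, d.getD c [] = occFrom src c 0) :
    ∀ (tgt : List Char), (∀ c ∈ tgt, c ∈ src) → ∀ (cnt : Int) (p : Nat),
    aLoop d tgt cnt ((p : Int) - 1) = bLoop src tgt cnt p := by
  intro tgt
  induction tgt with
  | nil => intro _ cnt p; rfl
  | cons c rest ih =>
    intro hall cnt p
    have hcs : c ∈ src := hall c List.mem_cons_self
    have hrest : ∀ x ∈ rest, x ∈ src := fun x hx => hall x (List.mem_cons_of_mem _ hx)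
    have hocc_ne : occFrom src c 0 ≠ [] := by
      intro hnil
      rcases List.mem_iff_getElem.1 hcs with ⟨i, hi, hic⟩
      have : ((0 : Int) + i) ∈ occFrom src c 0 :=
        (occFrom_mem c src 0 _).2 ⟨i, hi, hic, rfl⟩
      rw [hnil] at this
      cases this
    have hres := binSearch_resolve (occFrom src c 0) ((p : Int) - 1)
      (occFrom_sorted c src 0) hocc_ne
    rw [firstGT_occ_eq src c p] at hres
    rw [aLoop, bLoop, hd c]
    cases hfp : findFromC src c p with
    | some j =>
      rw [hfp] at hres
      have hres : (if binSearch (occFrom src c 0) ((p : Int) - 1) = -1 then (none : Option Int)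
          else some (PySem.List.pyGetD (occFrom src c 0)
            (binSearch (occFrom src c 0) ((p : Int) - 1)) 0)) = some ((j : Int)) := hres
      have hne : binSearch (occFrom src c 0) ((p : Int) - 1) ≠ -1 := by
        intro h
        rw [if_pos h] at hres
        cases hres
      rw [if_neg hne] at hres
      rw [if_neg hne]
      have hval : PySem.List.pyGetD (occFrom src c 0)
          (binSearch (occFrom src c 0) ((p : Int) - 1)) 0 = (j : Int) := by
        exact Option.some_inj.1 hres
      rw [hval]
      have : ((j : Int)) = ((j + 1 : Nat) : Int) - 1 := by push_cast; ring
      rw [this]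
      exact ih hrest cnt (j + 1)
    | none =>
      rw [hfp] at hres
      have hres : (if binSearch (occFrom src c 0) ((p : Int) - 1) = -1 then (none : Option Int)
          else some (PySem.List.pyGetD (occFrom src c 0)
            (binSearch (occFrom src c 0) ((p : Int) - 1)) 0)) = none := hres
      have heq : binSearch (occFrom src c 0) ((p : Int) - 1) = -1 := by
        by_contra hne
        rw [if_neg hne] at hres
        cases hres
      rw [if_pos heq]
      cases h0 : findFromC src c 0 with
      | none =>
        exfalso
        rcases List.mem_iff_getElem.1 hcs with ⟨i, hi, hic⟩
        exact (findFromC_none_iff src c 0).1 h0 i hi (Nat.zero_le i) hic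
      | some j0 =>
        -- the first element of the occurrence list is the first occurrence index j0
        have hkey := firstGT_occ_eq src c 0
        rw [h0] at hkey
        simp only [Nat.cast_zero, zero_sub] at hkey
        obtain ⟨x, t, hocc⟩ := List.exists_cons_of_ne_nil hocc_ne
        have hx0 : (0 : Int) ≤ x := by
          have : x ∈ occFrom src c 0 := by rw [hocc]; exact List.mem_cons_self
          simpa using occFrom_lb c src 0 x this
        have hhead : firstGT (occFrom src c 0) (-1) = some x := by
          rw [hocc, firstGT, if_pos (by omega)]
        rw [hhead] at hkey
        have hxj : x = (j0 : Int) := Option.some_inj.1 hkey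
        have hget0 : PySem.List.pyGetD (occFrom src c 0) 0 0 = x := by
          rw [hocc, PySem.List.pyGetD_eq_getElem (x :: t) 0 (by norm_num) (by simp)]
          simp
        rw [hget0, hxj]
        have : ((j0 : Int)) = ((j0 + 1 : Nat) : Int) - 1 := by push_cast; ring
        rw [this]
        exact ih hrest (cnt + 1) (j0 + 1)

-- can_create is exactly "every (lowered) target character occurs in the (lowered) source"
lemma can_create_iff (source target : String) :
    can_create source target = true ↔
      ∀ c ∈ (PySem.Str.lower target).toList, c ∈ (PySem.Str.lower source).toList := by
  unfold can_create
  rw [List.all_eq_true]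
  have hset : (PySem.Str.lower source).toList.foldl PySem.Set.add PySem.Set.empty =
      PySem.Set.ofList (PySem.Str.lower source).toList :=
    (PySem.Set.ofList_eq_foldl _).symm
  constructor
  · intro h c hc
    have := h c hc
    rw [hset] at this
    have hmem : c ∈ PySem.Set.ofList (PySem.Str.lower source).toList := by
      simpa [PySem.Set.contains] using this
    exact (PySem.Set.mem_ofList _ _).1 hmem
  · intro h c hc
    rw [hset]
    have hmem : c ∈ PySem.Set.ofList (PySem.Str.lower source).toList :=
      (PySem.Set.mem_ofList _ _).2 (h c hc)
    simpa [PySem.Set.contains] using hmem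

-- ===== VERDICT (by name: the statement is the Claim_ definition above) =====
theorem count_copies_bs_spec : Claim_equal_count_copies_bs := by
  unfold Claim_equal_count_copies_bs
  intro source target _
  unfold Spec_count_copies_bs count_copies_bs count_copies_bs_alt
  by_cases hcc : can_create source target = true
  · rw [if_neg (by simp [hcc])]
    have hall := (can_create_iff source target).1 hcc
    have hd : ∀ c, (buildIdx (PySem.Str.lower source).toList 0 PySem.Dict.empty).getD c [] =
        occFrom (PySem.Str.lower source).toList c 0 := by
      intro c
      have := buildIdx_getD (PySem.Str.lower source).toList 0 PySem.Dict.empty c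
      simpa [PySem.Dict.getD_empty] using this
    have := loop_eq (PySem.Str.lower source).toList _ hd (PySem.Str.lower target).toList hall 1 0
    simpa using this
  · have hfalse : can_create source target = false := by
      cases h : can_create source target
      · rfl
      · exact absurd h hcc
    rw [if_pos hfalse]
    have hex : ∃ c ∈ (PySem.Str.lower target).toList, c ∉ (PySem.Str.lower source).toList := by
      by_contra hno
      push Not at hno
      exact hcc ((can_create_iff source target).2 hno)
    exact (bLoop_zero _ _ 1 0 hex).symm
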